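-- pv_equiv track=rewrite | github.com/stephanbals/hiddenedge | core/cv/impact_service.py | split_roles
-- ===== SOURCE A (Python) =====
-- from typing import List, Dict
--
-- def split_roles(cv_text: str) -> List[Dict]:
--
--     lines = cv_text.split("\n")
--
--     roles = []
--     current = []
--
--     for line in lines:
--         line = line.strip()
--
--         if not line:
--             continue
--
--         if "|" in line and any(char.isdigit() for char in line):
--             if current:
--                 roles.append("\n".join(current))
--                 current = []
--
--         current.append(line)
--
--     if current:
--         roles.append("\n".join(current))
--
--     parsed = []
--     for r in roles[:6]:
--         title = r.split("\n")[0][:80]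
--         parsed.append({"title": title, "content": r})
--
--     return parsed
-- ===== SOURCE B (Python) =====
-- def split_roles(cv_text):
--     def is_header(s):
--         return "|" in s and any(c.isdigit() for c in s)
--
--     cleaned = [s for s in map(str.strip, cv_text.split("\n")) if s]
--
--     # build the role groups back-to-front: a line merges into the group after it
--     # unless that group starts with a header line (or there is none yet)
--     groups = []
--     for s in reversed(cleaned):
--         if groups and not is_header(groups[0][0]):
--             groups[0].insert(0, s)
--         else:
--             groups.insert(0, [s])
--
--     return [{"title": g[0][:80], "content": "\n".join(g)} for g in groups[:6]]
-- ===== Notes on version B (the rewrite author's own statement) =====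
-- stated objective: alternative
-- what changed: B first builds the cleaned (stripped, non-empty) line list in one comprehension, then forms the role groups back-to-front in a single reversed pass (a line merges into the group after it unless that group starts with a header line), and takes each title directly from the group's first line instead of flushing an accumulator and re-splitting the joined role strings.
import Mathlib
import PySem

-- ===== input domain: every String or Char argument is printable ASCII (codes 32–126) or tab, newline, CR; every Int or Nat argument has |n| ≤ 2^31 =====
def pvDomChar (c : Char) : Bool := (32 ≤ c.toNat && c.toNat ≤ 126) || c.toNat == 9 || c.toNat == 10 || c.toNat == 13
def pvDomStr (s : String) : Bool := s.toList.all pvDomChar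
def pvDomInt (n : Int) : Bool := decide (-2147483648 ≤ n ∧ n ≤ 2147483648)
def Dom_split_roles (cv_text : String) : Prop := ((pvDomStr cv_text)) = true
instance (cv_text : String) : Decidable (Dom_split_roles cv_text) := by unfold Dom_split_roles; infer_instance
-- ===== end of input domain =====

-- B re-implements A with a different decomposition (clean the lines once, then build the role
-- groups back-to-front, titles taken directly from each group's first line); same cost, no speed claim.

-- ===== PORT A =====
-- loop body of A's first 'for' as a named helper (state = (roles, current))
def aStep (st : List String × List String) (line : String) : List String × List String :=
  let line := PySem.Str.strip line
  if line = "" then st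
  else if PySem.Str.isIn "|" line && line.toList.any PySem.Chars.isdigit then
    (if st.2 ≠ [] then (st.1 ++ [PySem.Str.join "\n" st.2], [line]) else (st.1, st.2 ++ [line]))
  else (st.1, st.2 ++ [line])

def split_roles (cv_text : String) : List (List (String × String)) :=
  let lines := (PySem.Str.split? cv_text "\n").getD []    -- sep "\n" ≠ "": split? is never none
  let st := lines.foldl aStep ([], [])
  let roles := if st.2 ≠ [] then st.1 ++ [PySem.Str.join "\n" st.2] else st.1
  (PySem.List.slice roles none (some 6)).foldl (fun parsed r =>
      -- r.split("\n")[0][:80]; the split list is never empty, so [0] is its head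
      let title := PySem.Str.slice (((PySem.Str.split? r "\n").getD []).headD "") none (some 80)
      parsed ++ [[("title", title), ("content", r)]]) []

-- ===== PORT B =====
def bIsHeader (s : String) : Bool :=
  PySem.Str.isIn "|" s && s.toList.any PySem.Chars.isdigit

-- one step of B's right-to-left pass: line s merges into the group after it
-- unless that group starts with a header line (or there is none yet)
def bStep (s : String) (groups : List (List String)) : List (List String) :=
  match groups with
  | (t :: g) :: gs => if bIsHeader t = false then (s :: t :: g) :: gs else [s] :: (t :: g) :: gs
  | gs => [s] :: gs

def split_roles_alt (cv_text : String) : List (List (String × String)) :=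
  let cleaned := (((PySem.Str.split? cv_text "\n").getD []).map PySem.Str.strip).filter
      (fun s => s ≠ "")
  let groups := cleaned.foldr bStep []
  (PySem.List.slice groups none (some 6)).map (fun g =>
    [("title", PySem.Str.slice (g.headD "") none (some 80)),
     ("content", PySem.Str.join "\n" g)])

-- ===== PRECONDITION & SPEC =====
def Spec_split_roles (cv_text : String) (out : List (List (String × String))) : Prop := out = split_roles_alt cv_text
instance (cv_text : String) (out : List (List (String × String))) : Decidable (Spec_split_roles cv_text out) := by unfold Spec_split_roles; infer_instance

-- ===== CLAIM (what is proved, stated in full; the proofs are below) =====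
def Claim_equal_split_roles : Prop := ∀ (cv_text : String), Dom_split_roles cv_text → Spec_split_roles cv_text (split_roles cv_text)

-- ===== LEMMAS AND PROOFS =====

-- A's flushed loop, written as a recursion over the already-cleaned lines
def aRoles (current : List String) : List String → List String
  | [] => if current ≠ [] then [PySem.Str.join "\n" current] else []
  | s :: ls =>
    if bIsHeader s = true ∧ current ≠ [] then
      PySem.Str.join "\n" current :: aRoles [s] ls
    else aRoles (current ++ [s]) ls

-- prepend a pending (nonempty) current group onto B's groups, merging with a headerless first group
def attachCur (c : List String) (groups : List (List String)) : List (List String) :=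
  match groups with
  | (t :: g) :: gs => if bIsHeader t = false then (c ++ t :: g) :: gs else c :: (t :: g) :: gs
  | gs => c :: gs

lemma go_splitOn (c : Char) :
    ∀ (fuel : Nat) (l cur : List Char) (acc : List (List Char)), l.length < fuel →
      PySem.Chars.splitOn.go [c] fuel l cur acc
        = acc.reverse ++ (l.splitOn c).modifyHead (cur.reverse ++ ·) := by
  intro fuel
  induction fuel with
  | zero => intro l cur acc h; omega
  | succ f ih =>
    intro l cur acc h
    cases l with
    | nil =>
      simp [PySem.Chars.splitOn.go, List.splitOn_nil]
    | cons x rest =>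
      rw [PySem.Chars.splitOn.go]
      by_cases hx : x = c
      · subst hx
        have hpre : List.isPrefixOf [x] (x :: rest) = true := by
          simp [List.isPrefixOf]
        rw [if_pos hpre]
        simp only [List.length_cons] at h
        rw [ih _ _ _ (by simpa using Nat.lt_of_succ_lt_succ h)]
        simp [List.splitOn, List.splitOnP_cons]
        rcases hsp : rest.splitOnP (· == x) with _ | ⟨hd, tl⟩
        · exact absurd hsp (List.splitOnP_ne_nil _ _)
        · simp
      · have hpre : List.isPrefixOf [c] (x :: rest) = false := by
          simp [List.isPrefixOf]; exact fun hh => absurd hh.symm hx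
        rw [if_neg (by simp [hpre])]
        simp only [List.length_cons] at h
        rw [ih _ _ _ (by omega)]
        simp [List.splitOn, List.splitOnP_cons, beq_iff_eq, hx]
        rcases hsp : rest.splitOnP (· == c) with _ | ⟨hd, tl⟩
        · exact absurd hsp (List.splitOnP_ne_nil _ _)
        · simp

lemma chars_splitOn_single (cs : List Char) (c : Char) :
    PySem.Chars.splitOn cs [c] = cs.splitOn c := by
  rw [PySem.Chars.splitOn, go_splitOn c _ _ _ _ (by omega)]
  rcases hsp : cs.splitOn c with _ | ⟨hd, tl⟩
  · exact absurd hsp (by simp [List.splitOn]; exact List.splitOnP_ne_nil _ _)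
  · simp

lemma splitOnP_pieces {α : Type} (q : α → Bool) :
    ∀ (xs piece : List α), piece ∈ xs.splitOnP q → ∀ x ∈ piece, q x = false := by
  intro xs
  induction xs with
  | nil => intro piece hp x hx; simp [List.splitOnP_nil] at hp; subst hp; simp at hx
  | cons y ys ih =>
    intro piece hp x hx
    rw [List.splitOnP_cons] at hp
    by_cases hy : q y
    · rw [if_pos hy] at hp
      rcases List.mem_cons.mp hp with hp | hp
      · subst hp; simp at hx
      · exact ih piece hp x hx
    · rw [if_neg hy] at hp
      rcases hsp : ys.splitOnP q with _ | ⟨hd, tl⟩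
      · exact absurd hsp (List.splitOnP_ne_nil _ _)
      · rw [hsp] at hp
        simp only [List.modifyHead] at hp
        rcases List.mem_cons.mp hp with hp | hp
        · subst hp
          rcases List.mem_cons.mp hx with hx | hx
          · rw [hx]; simpa using hy
          · exact ih hd (by rw [hsp]; exact List.mem_cons_self ..) x hx
        · exact ih piece (by rw [hsp]; exact List.mem_cons_of_mem _ hp) x hx

lemma mem_strip {x : Char} {cs : List Char} (h : x ∈ PySem.Chars.strip cs) : x ∈ cs := by
  rw [PySem.Chars.strip, PySem.Chars.rstrip, PySem.Chars.lstrip] at h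
  have h1 := (List.dropWhile_sublist _).mem (List.mem_reverse.mp h)
  exact (List.dropWhile_sublist _).mem (List.mem_reverse.mp h1)

lemma split_join_roundtrip (g : List String) (hne : g ≠ [])
    (hnl : ∀ s ∈ g, '\n' ∉ s.toList) :
    (PySem.Str.split? (PySem.Str.join "\n" g) "\n").getD [] = g := by
  rw [PySem.Str.split?]
  have hsep : ("\n" : String).toList = ['\n'] := by decide
  rw [PySem.Chars.split?, hsep]
  rw [if_neg (by simp)]
  rw [PySem.Str.toList_join, hsep, PySem.Chars.join]
  rw [chars_splitOn_single]
  rw [List.splitOn_intercalate (ls := List.map String.toList g) '\n'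
      (by
        intro l hl
        rcases List.mem_map.mp hl with ⟨s, hs, rfl⟩
        exact hnl s hs)
      (by simpa using hne)]
  simp only [Option.map_some, Option.getD_some, List.map_map]
  exact (List.map_congr_left (fun s _ => String.ofList_toList (s := s))).trans (List.map_id _)

lemma cleaned_no_newline (cv_text : String) :
    ∀ s ∈ (((PySem.Str.split? cv_text "\n").getD []).map PySem.Str.strip).filter
        (fun s => s ≠ ""), '\n' ∉ s.toList := by
  intro s hs
  have hs' := List.mem_of_mem_filter hs
  rcases List.mem_map.mp hs' with ⟨l, hl, rfl⟩
  have hsep : ("\n" : String).toList = ['\n'] := by decide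
  rw [PySem.Str.split?, PySem.Chars.split?, hsep, if_neg (by simp), chars_splitOn_single] at hl
  simp only [Option.map_some, Option.getD_some] at hl
  rcases List.mem_map.mp hl with ⟨p, hp, rfl⟩
  have hnp : '\n' ∉ p := by
    have h2 := splitOnP_pieces (· == '\n') cv_text.toList p (by simpa [List.splitOn] using hp)
    intro hmem
    have := h2 '\n' hmem
    simp at this
  intro hmem
  rw [PySem.Str.toList_strip] at hmem
  exact hnp (by simpa [String.toList_ofList] using mem_strip hmem)


lemma mem_foldr_bStep (ls : List String) (g : List String) (hg : g ∈ ls.foldr bStep []) :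
    g ≠ [] ∧ ∀ x ∈ g, x ∈ ls := by
  induction ls generalizing g with
  | nil => simp at hg
  | cons s ls ih =>
    simp only [List.foldr_cons] at hg
    rcases hG : ls.foldr bStep [] with _ | ⟨g0, gs⟩
    · rw [hG] at hg
      simp only [bStep, List.mem_singleton] at hg
      subst hg
      exact ⟨by simp, by simp⟩
    · rw [hG] at hg
      have sub : ∀ h ∈ (g0 :: gs), h ≠ [] ∧ ∀ x ∈ h, x ∈ s :: ls := by
        intro h hh
        have := ih h (hG ▸ hh)
        exact ⟨this.1, fun x hx => List.mem_cons_of_mem _ (this.2 x hx)⟩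
      cases g0 with
      | nil =>
        simp only [bStep] at hg
        rcases List.mem_cons.mp hg with rfl | hg
        · exact ⟨by simp, by simp⟩
        · exact sub g hg
      | cons t g0t =>
        simp only [bStep] at hg
        by_cases ht : bIsHeader t = false
        · rw [if_pos ht] at hg
          rcases List.mem_cons.mp hg with rfl | hg
          · refine ⟨by simp, ?_⟩
            intro x hx
            rcases List.mem_cons.mp hx with rfl | hx
            · simp
            · exact (sub (t :: g0t) (List.mem_cons_self ..)).2 x hx
          · exact sub g (List.mem_cons_of_mem _ hg)
        · rw [if_neg ht] at hg
          rcases List.mem_cons.mp hg with rfl | hg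
          · exact ⟨by simp, by simp⟩
          · exact sub g hg

lemma aRoles_eq_attach (ls : List String) :
    ∀ (c : List String), c ≠ [] →
      aRoles c ls = (attachCur c (ls.foldr bStep [])).map (PySem.Str.join "\n") := by
  induction ls with
  | nil =>
    intro c hc
    simp [aRoles, attachCur, hc]
  | cons s ls ih =>
    intro c hc
    rw [aRoles]
    simp only [List.foldr_cons]
    by_cases hs : bIsHeader s = true
    · rw [if_pos ⟨hs, hc⟩, ih [s] (by simp)]
      -- attachCur c (bStep s G) = c :: attachCur [s] G and attachCur [s] G = bStep s G
      have h1 : attachCur [s] (ls.foldr bStep []) = bStep s (ls.foldr bStep []) := by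
        rcases ls.foldr bStep [] with _ | ⟨g0, gs⟩
        · rfl
        · cases g0 <;> simp [attachCur, bStep]
      have h2 : attachCur c (bStep s (ls.foldr bStep [])) = c :: bStep s (ls.foldr bStep []) := by
        rcases ls.foldr bStep [] with _ | ⟨g0, gs⟩
        · simp [bStep, attachCur, hs]
        · cases g0 with
          | nil => simp [bStep, attachCur, hs]
          | cons t g0t =>
            by_cases ht : bIsHeader t = false <;> simp [bStep, attachCur, hs, ht]
      rw [h2, ← h1]
      simp
    · rw [if_neg (by tauto), ih (c ++ [s]) (by simp)]
      congr 1
      rcases ls.foldr bStep [] with _ | ⟨g0, gs⟩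
      · simp [bStep, attachCur, hs]
      · cases g0 with
        | nil => simp [bStep, attachCur, hs]
        | cons t g0t =>
          by_cases ht : bIsHeader t = false <;> simp [bStep, attachCur, hs, ht]

lemma aRoles_nil_eq (ls : List String) :
    aRoles [] ls = (ls.foldr bStep []).map (PySem.Str.join "\n") := by
  cases ls with
  | nil => simp [aRoles]
  | cons s ls =>
    rw [aRoles, if_neg (by simp)]
    simp only [List.nil_append]
    have h1 : attachCur [s] (ls.foldr bStep []) = bStep s (ls.foldr bStep []) := by
      rcases ls.foldr bStep [] with _ | ⟨g0, gs⟩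
      · rfl
      · cases g0 <;> simp [attachCur, bStep]
    rw [aRoles_eq_attach ls [s] (by simp), h1, List.foldr_cons]

set_option maxHeartbeats 2000000 in
lemma foldl_aStep_eq_aRoles (lines : List String) :
    ∀ (roles current : List String),
      (let st := lines.foldl aStep (roles, current)
       if st.2 ≠ [] then st.1 ++ [PySem.Str.join "\n" st.2] else st.1)
      = roles ++ aRoles current ((lines.map PySem.Str.strip).filter (fun s => s ≠ "")) := by
  induction lines with
  | nil =>
    intro roles current
    by_cases hc : current = []
    · simp [aRoles, hc]
    · simp [aRoles, hc]
  | cons l lines ih =>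
    intro roles current
    simp only [List.foldl_cons, List.map_cons, List.filter_cons]
    by_cases hl : PySem.Str.strip l = ""
    · have hstep : aStep (roles, current) l = (roles, current) := by
        simp only [aStep]
        rw [if_pos hl]
      rw [hstep, ih roles current]
      simp [hl]
    · have hfil : (decide (PySem.Str.strip l ≠ "")) = true := by simpa using hl
      rw [hfil, if_pos rfl, aRoles]
      by_cases hcond : bIsHeader (PySem.Str.strip l) = true ∧ current ≠ []
      · have hh : (PySem.Str.isIn "|" (PySem.Str.strip l)
            && (PySem.Str.strip l).toList.any PySem.Chars.isdigit) = true := hcond.1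
        have hstep : aStep (roles, current)
            l = (roles ++ [PySem.Str.join "\n" current], [PySem.Str.strip l]) := by
          simp only [aStep]
          rw [if_neg hl, if_pos hh, if_pos hcond.2]
        rw [hstep, ih, if_pos hcond, List.append_assoc]
        rfl
      · have hstep : aStep (roles, current) l = (roles, current ++ [PySem.Str.strip l]) := by
          simp only [aStep]
          rw [if_neg hl]
          by_cases hhh : bIsHeader (PySem.Str.strip l) = true
          · have hc : current = [] := by by_contra hcc; exact hcond ⟨hhh, hcc⟩
            have hh : (PySem.Str.isIn "|" (PySem.Str.strip l)
                && (PySem.Str.strip l).toList.any PySem.Chars.isdigit) = true := hhh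
            rw [if_pos hh, if_neg (by simp [hc])]
          · have hh : ¬ ((PySem.Str.isIn "|" (PySem.Str.strip l)
                && (PySem.Str.strip l).toList.any PySem.Chars.isdigit) = true) := hhh
            rw [if_neg hh]
        rw [hstep, ih, if_neg hcond]

-- ===== VERDICT (by name: the statement is the Claim_ definition above) =====
theorem split_roles_spec : Claim_equal_split_roles := by
  intro cv_text _hdom
  show split_roles cv_text = split_roles_alt cv_text
  simp only [split_roles, split_roles_alt]
  rw [foldl_aStep_eq_aRoles, aRoles_nil_eq]
  simp only [List.nil_append]
  rw [PySem.List.slice_to _ (by norm_num : (0:Int) ≤ 6), PySem.List.slice_to _ (by norm_num : (0:Int) ≤ 6)]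
  rw [PySem.List.foldl_append_singleton_eq_map]
  simp only [List.nil_append]
  rw [show ((6:Int).toNat) = 6 from rfl, ← List.map_take, List.map_map]
  apply List.map_congr_left
  intro g hg
  have hmem := mem_foldr_bStep _ g (List.mem_of_mem_take hg)
  have hnl : ∀ s ∈ g, '\n' ∉ s.toList := fun s hs =>
    cleaned_no_newline cv_text s (hmem.2 s hs)
  have hrt := split_join_roundtrip g hmem.1 hnl
  simp only [Function.comp_apply, hrt]
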